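-- pv_equiv track=rewrite | github.com/broadinstitute/wot | wot/io.py | get_file_basename_and_extension
-- ===== SOURCE A (Python) =====
-- def get_file_basename_and_extension(name):
--     dot_index = name.rfind('.')
--     ext = ''
--     basename = name
--     if dot_index != -1:
--         ext = name[dot_index + 1:]
--         if ext == 'gz':
--             return get_file_basename_and_extension(name[0:dot_index])
--
--     if dot_index != -1:
--         basename = name[0:dot_index]
--     return basename, ext
-- ===== SOURCE B (Python) =====
-- def get_file_basename_and_extension(name):
--     # Split into dot-separated components, pop trailing gzip components, rejoin.
--     parts = name.split('.')
--     while len(parts) > 1 and parts[-1] == 'gz':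
--         parts.pop()
--     if len(parts) == 1:
--         return parts[0], ''
--     return '.'.join(parts[:-1]), parts[-1]
-- ===== Notes on version B (the rewrite author's own statement) =====
-- stated objective: alternative
-- what changed: Replaces A's rfind/slice tail recursion with a component-list decomposition: split the name at the dots, pop trailing gzip components in a while-loop, then rejoin all but the last component.
import Mathlib
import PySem

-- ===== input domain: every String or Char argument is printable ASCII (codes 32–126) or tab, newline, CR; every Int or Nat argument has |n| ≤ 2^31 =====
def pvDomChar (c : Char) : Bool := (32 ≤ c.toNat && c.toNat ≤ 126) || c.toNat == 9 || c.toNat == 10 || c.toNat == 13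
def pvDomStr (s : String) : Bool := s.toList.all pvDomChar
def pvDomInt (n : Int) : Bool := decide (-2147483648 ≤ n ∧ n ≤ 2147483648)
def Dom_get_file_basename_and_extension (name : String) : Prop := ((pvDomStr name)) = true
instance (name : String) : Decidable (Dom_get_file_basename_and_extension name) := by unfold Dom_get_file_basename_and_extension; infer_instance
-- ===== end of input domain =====

-- B replaces A's rfind/slice tail recursion with a split-on-dot component list: pop trailing gzip components, rejoin; objective: alternative.

-- termination lemma for port A (cited in decreasing_by)
theorem pvRfindGo_bound (s sub : List Char) (hsub : sub ≠ []) :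
    ∀ k : Nat, PySem.Chars.rfind.go s sub k = -1 ∨
      ∃ j : Nat, PySem.Chars.rfind.go s sub k = j ∧ j < s.length := by
  intro k
  induction k with
  | zero =>
    by_cases h : sub.isPrefixOf s
    · right
      refine ⟨0, by simp [PySem.Chars.rfind.go, h], ?_⟩
      rcases List.isPrefixOf_iff_prefix.mp h with hp
      cases s with
      | nil => exact absurd (List.prefix_nil.mp hp) hsub
      | cons a t => simp
    · left; simp [PySem.Chars.rfind.go, h]
  | succ j ih =>
    by_cases h : sub.isPrefixOf (s.drop (j+1))
    · right
      refine ⟨j+1, by simp [PySem.Chars.rfind.go, h], ?_⟩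
      have hp := List.isPrefixOf_iff_prefix.mp h
      by_contra hc
      have : s.drop (j+1) = [] := List.drop_eq_nil_of_le (by omega)
      rw [this] at hp
      exact hsub (List.prefix_nil.mp hp)
    · have : PySem.Chars.rfind.go s sub (j+1) = PySem.Chars.rfind.go s sub j := by
        simp [PySem.Chars.rfind.go, h]
      rw [this]; exact ih

theorem pvRfind_slice_len_lt (name : String) (h : ¬ PySem.Str.rfind name "." = -1) :
    (PySem.Str.slice name (some 0) (some (PySem.Str.rfind name "."))).length < name.length := by
  have hb := pvRfindGo_bound name.toList ".".toList (by decide) name.toList.length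
  have hr : PySem.Str.rfind name "." = PySem.Chars.rfind name.toList ".".toList := by
    simp [PySem.Str.rfind_eq]
  rcases hb with hneg | ⟨j, hj, hlt⟩
  · exact absurd (by rw [hr]; exact hneg) h
  · have hrj : PySem.Str.rfind name "." = (j : Int) := by rw [hr]; exact hj
    rw [hrj]
    have : (PySem.Str.slice name (some 0) (some (j : Int))).toList
        = name.toList.take j := by
      simp [PySem.Str.toList_slice, PySem.Chars.slice_eq_listSlice, PySem.List.slice_to]
    have hlen : (PySem.Str.slice name (some 0) (some (j : Int))).length
        = (name.toList.take j).length := by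
      rw [← String.length_toList, this]
    rw [hlen, List.length_take, ← String.length_toList]
    omega

-- ===== PORT A =====
def get_file_basename_and_extension (name : String) : String × String :=
  let dot_index := PySem.Str.rfind name "."
  if h : ¬ dot_index = -1 then
    let ext := PySem.Str.slice name (some (dot_index + 1)) none
    if ext == "gz" then
      get_file_basename_and_extension (PySem.Str.slice name (some 0) (some dot_index))
    else
      (PySem.Str.slice name (some 0) (some dot_index), ext)
  else
    (name, "")
termination_by name.length
decreasing_by exact pvRfind_slice_len_lt name h

-- ===== PORT B =====
-- the while-loop of Source B: pop the last component while there are several and it is the gzip suffix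
def pvPopGz (parts : List String) : List String :=
  if h : 1 < parts.length ∧ PySem.List.pyGet? parts (-1) = some "gz" then
    pvPopGz parts.dropLast
  else
    parts
termination_by parts.length
decreasing_by simp [List.length_dropLast]; omega

def get_file_basename_and_extension_alt (name : String) : String × String :=
  let parts0 := (PySem.Str.split? name ".").getD []
  let parts := pvPopGz parts0
  if parts.length == 1 then
    ((PySem.List.pyGet? parts 0).getD "", "")
  else
    (PySem.Str.join "." parts.dropLast, (PySem.List.pyGet? parts (-1)).getD "")

-- ===== PRECONDITION & SPEC =====
def Spec_get_file_basename_and_extension (name : String) (out : String × String) : Prop := out = get_file_basename_and_extension_alt name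
instance (name : String) (out : String × String) : Decidable (Spec_get_file_basename_and_extension name out) := by unfold Spec_get_file_basename_and_extension; infer_instance

-- ===== CLAIM (what is proved, stated in full; the proofs are below) =====
def Claim_equal_get_file_basename_and_extension : Prop := ∀ (name : String), Dom_get_file_basename_and_extension name → Spec_get_file_basename_and_extension name (get_file_basename_and_extension name)

-- ===== LEMMAS AND PROOFS =====

-- a simple structural model of splitting at dots, used only in the proofs
def pvSp : List Char → List (List Char)
  | [] => [[]]
  | c :: rest => if c = '.' then [] :: pvSp rest else (pvSp rest).modifyHead (c :: ·)

theorem pvSp_length_pos (s : List Char) : 0 < (pvSp s).length := by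
  induction s with
  | nil => simp [pvSp]
  | cons c rest ih =>
    by_cases h : c = '.'
    · simp [pvSp, h]
    · simpa [pvSp, h] using ih

theorem pvSp_ne_nil (s : List Char) : pvSp s ≠ [] := by
  have := pvSp_length_pos s
  intro h; rw [h] at this; simp at this

theorem pvGoSpec : ∀ (fuel : Nat) (l cur : List Char) (acc : List (List Char)),
    l.length ≤ fuel →
    PySem.Chars.splitOn.go ['.'] fuel l cur acc
      = acc.reverse ++ (pvSp l).modifyHead (cur.reverse ++ ·) := by
  intro fuel
  induction fuel with
  | zero =>
    intro l cur acc hl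
    have hl0 : l = [] := List.length_eq_zero_iff.mp (by omega)
    subst hl0
    simp [PySem.Chars.splitOn.go, pvSp]
  | succ f ih =>
    intro l cur acc hl
    cases l with
    | nil => simp [PySem.Chars.splitOn.go, pvSp]
    | cons c rest =>
      by_cases h : c = '.'
      · subst h
        have hstep : PySem.Chars.splitOn.go ['.'] (f+1) ('.'::rest) cur acc
            = PySem.Chars.splitOn.go ['.'] f rest [] (cur.reverse :: acc) := by
          rw [PySem.Chars.splitOn.go]; simp [List.isPrefixOf]
        rw [hstep, ih rest [] (cur.reverse :: acc) (by simpa using Nat.lt_succ_iff.mp (by simpa using hl))]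
        obtain ⟨hh, ht, hsp⟩ := List.exists_cons_of_ne_nil (pvSp_ne_nil (rest))
        simp [pvSp, hsp, List.modifyHead]
      · have hstep : PySem.Chars.splitOn.go ['.'] (f+1) (c::rest) cur acc
            = PySem.Chars.splitOn.go ['.'] f rest (c :: cur) acc := by
          have h' : ¬ ('.' = c) := fun he => h he.symm
          rw [PySem.Chars.splitOn.go]
          simp [List.isPrefixOf, h']
        rw [hstep, ih rest (c :: cur) acc (by simpa using Nat.lt_succ_iff.mp (by simpa using hl))]
        obtain ⟨hh, ht, hsp⟩ := List.exists_cons_of_ne_nil (pvSp_ne_nil (rest))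
        simp [pvSp, h, hsp, List.modifyHead]
  
theorem pvSplitOn_eq (s : List Char) : PySem.Chars.splitOn s ['.'] = pvSp s := by
  have := pvGoSpec (s.length + 1) s [] [] (by omega)
  rw [PySem.Chars.splitOn, this]
  obtain ⟨hh, ht, hsp⟩ := List.exists_cons_of_ne_nil (pvSp_ne_nil (s))
  simp [hsp, List.modifyHead]

theorem pvSp_no_dot (s : List Char) (h : '.' ∉ s) : pvSp s = [s] := by
  induction s with
  | nil => simp [pvSp]
  | cons c rest ih =>
    have hc : ¬ c = '.' := fun he => h (by simp [he])
    have hr : '.' ∉ rest := fun hm => h (by simp [hm])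
    simp [pvSp, hc, ih hr, List.modifyHead]

theorem pvSp_append (a b : List Char) (hb : '.' ∉ b) :
    pvSp (a ++ '.' :: b) = pvSp a ++ [b] := by
  induction a with
  | nil => simp [pvSp, pvSp_no_dot b hb]
  | cons c a' ih =>
    by_cases h : c = '.'
    · simp [pvSp, h, ih]
    · obtain ⟨hh, ht, hsp⟩ := List.exists_cons_of_ne_nil (pvSp_ne_nil (a'))
      simp [pvSp, h, ih, hsp, List.modifyHead]

theorem pvJoin_sp (t : List Char) : PySem.Chars.join ['.'] (pvSp t) = t := by
  induction t with
  | nil => simp [pvSp, PySem.Chars.join_singleton]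
  | cons c r ih =>
    obtain ⟨hh, ht, hsp⟩ := List.exists_cons_of_ne_nil (pvSp_ne_nil (r))
    by_cases h : c = '.'
    · subst h
      rw [pvSp, if_pos rfl, hsp, PySem.Chars.join_cons_cons, ← hsp, ih]
      simp
    · rw [pvSp, if_neg h, hsp, List.modifyHead]
      cases ht with
      | nil =>
        rw [PySem.Chars.join_singleton]
        have := ih; rw [hsp, PySem.Chars.join_singleton] at this
        simp [this]
      | cons h2 t2 =>
        rw [PySem.Chars.join_cons_cons]
        have := ih; rw [hsp, PySem.Chars.join_cons_cons] at this
        simpa using this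

theorem pvGoRfindSpec (s : List Char) : ∀ k : Nat,
    (PySem.Chars.rfind.go s ['.'] k = -1 ∧ ∀ j : Nat, j ≤ k → ¬ ['.'] <+: s.drop j) ∨
    (∃ j : Nat, j ≤ k ∧ PySem.Chars.rfind.go s ['.'] k = (j : Int) ∧ ['.'] <+: s.drop j ∧
      ∀ m : Nat, j < m → m ≤ k → ¬ ['.'] <+: s.drop m) := by
  intro k
  induction k with
  | zero =>
    by_cases h : List.isPrefixOf ['.'] s
    · right
      refine ⟨0, le_refl 0, by simp [PySem.Chars.rfind.go, h], ?_, ?_⟩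
      · simpa using List.isPrefixOf_iff_prefix.mp h
      · intro m hm hm'
        exact absurd (Nat.lt_of_lt_of_le hm hm') (by omega)
    · left
      refine ⟨by simp [PySem.Chars.rfind.go, h], fun j hj => ?_⟩
      have hj0 : j = 0 := by omega
      subst hj0
      intro hp
      exact h (List.isPrefixOf_iff_prefix.mpr (by simpa using hp))
  | succ k' ih =>
    by_cases h : List.isPrefixOf ['.'] (s.drop (k'+1))
    · right
      refine ⟨k'+1, le_refl _, by simp [PySem.Chars.rfind.go, h],
        List.isPrefixOf_iff_prefix.mp h, ?_⟩
      intro m hm hm'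
      exact absurd (Nat.lt_of_lt_of_le hm hm') (by omega)
    · have hstep : PySem.Chars.rfind.go s ['.'] (k'+1) = PySem.Chars.rfind.go s ['.'] k' := by
        simp [PySem.Chars.rfind.go, h]
      rcases ih with ⟨hv, hall⟩ | ⟨j, hjk, hv, hp, hmax⟩
      · left
        refine ⟨by rw [hstep]; exact hv, fun j hj hp => ?_⟩
        rcases Nat.lt_or_ge j (k'+1) with hlt | hge
        · exact hall j (by omega) hp
        · have hje : j = k'+1 := by omega
          subst hje
          exact h (List.isPrefixOf_iff_prefix.mpr hp)
      · right
        refine ⟨j, by omega, by rw [hstep]; exact hv, hp, fun m hm hm' hpm => ?_⟩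
        rcases Nat.lt_or_ge m (k'+1) with hlt | hge
        · exact hmax m hm (by omega) hpm
        · have hme : m = k'+1 := by omega
          subst hme
          exact h (List.isPrefixOf_iff_prefix.mpr hpm)

theorem pvSingletonPrefix {c : Char} {l : List Char} (h : [c] <+: l) :
    ∃ t, l = c :: t := by
  rcases h with ⟨t, ht⟩
  exact ⟨t, ht.symm⟩

theorem pvRfindChars (s : List Char) :
    (PySem.Chars.rfind s ['.'] = -1 ∧ '.' ∉ s) ∨
    (∃ i : Nat, i < s.length ∧ PySem.Chars.rfind s ['.'] = (i : Int) ∧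
      s = s.take i ++ '.' :: s.drop (i+1) ∧ '.' ∉ s.drop (i+1)) := by
  rcases pvGoRfindSpec s s.length with ⟨hv, hall⟩ | ⟨j, hjk, hv, hp, hmax⟩
  · left
    refine ⟨hv, fun hmem => ?_⟩
    rcases List.append_of_mem hmem with ⟨a, b, hab⟩
    have hdrop : s.drop a.length = '.' :: b := by rw [hab, List.drop_left]
    have hle : a.length ≤ s.length := by rw [hab]; simp
    exact hall a.length hle (by rw [hdrop]; exact ⟨b, rfl⟩)
  · right
    rcases pvSingletonPrefix hp with ⟨t, ht⟩
    have hjlt : j < s.length := by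
      by_contra hc
      have hnil : s.drop j = [] := List.drop_eq_nil_of_le (by omega)
      rw [hnil] at ht
      exact absurd ht (by simp)
    have hdrop1 : s.drop (j+1) = t := by
      have h1 : (s.drop j).drop 1 = s.drop (j+1) := by
        rw [List.drop_drop]
      rw [← h1, ht]
      simp
    refine ⟨j, hjlt, hv, ?_, ?_⟩
    · conv_lhs => rw [← List.take_append_drop j s]
      rw [ht, hdrop1]
    · intro hmem
      rcases List.append_of_mem hmem with ⟨a, b, hab⟩
      have hdrop2 : s.drop (j+1+a.length) = '.' :: b := by
        have h2 : (s.drop (j+1)).drop a.length = s.drop (j+1+a.length) := by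
          rw [List.drop_drop]
        rw [← h2, hab, List.drop_left]
      have hlen : j+1+a.length < s.length := by
        by_contra hc
        have hnil : s.drop (j+1+a.length) = [] := List.drop_eq_nil_of_le (by omega)
        rw [hnil] at hdrop2
        exact absurd hdrop2 (by simp)
      exact hmax (j+1+a.length) (by omega) (by omega) (by rw [hdrop2]; exact ⟨b, rfl⟩)

theorem pvStrEqOfToList {s : String} {l : List Char} (h : s.toList = l) :
    s = String.ofList l := by
  rw [← h, String.ofList_toList]

theorem pvSliceTake (name : String) (i : Nat) :
    (PySem.Str.slice name (some 0) (some (i : Int))).toList = name.toList.take i := by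
  simp [PySem.Str.toList_slice, PySem.Chars.slice_eq_listSlice, PySem.List.slice_to]

theorem pvSliceDrop (name : String) (i : Nat) :
    (PySem.Str.slice name (some (i : Int)) none).toList = name.toList.drop i := by
  simp [PySem.Str.toList_slice, PySem.Chars.slice_eq_listSlice, PySem.List.slice_from]

theorem pvSplitParts (name : String) :
    (PySem.Str.split? name ".").getD [] = (pvSp name.toList).map String.ofList := by
  rw [PySem.Str.split?]
  simp [PySem.Chars.split?, pvSplitOn_eq]

theorem pvPyGetLast {α : Type} (l : List α) (x : α) :
    PySem.List.pyGet? (l ++ [x]) (-1) = some x := by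
  simp [PySem.List.pyGet?, PySem.List.pyIdx?]

theorem pvToListGz : "gz".toList = ['g', 'z'] := by decide

theorem pvOfListGz : String.ofList ['g', 'z'] = "gz" := by
  rw [← pvToListGz, String.ofList_toList]

theorem pvMain : ∀ (n : Nat) (name : String), name.length = n →
    get_file_basename_and_extension name = get_file_basename_and_extension_alt name := by
  intro n
  induction n using Nat.strong_induction_on with
  | _ n ih =>
    intro name hlen
    have hrfind : PySem.Str.rfind name "." = PySem.Chars.rfind name.toList ['.'] := by
      simp [PySem.Str.rfind_eq]
    rcases pvRfindChars name.toList with ⟨hneg, hnot⟩ | ⟨i, hil, hri, hdecomp, hnd⟩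
    · -- no dot: A returns the name with an empty extension; B's component list is a singleton, the loop idles
      have hparts : (PySem.Str.split? name ".").getD [] = [name] := by
        rw [pvSplitParts, pvSp_no_dot name.toList hnot]
        simp [String.ofList_toList]
      have hpop : pvPopGz [name] = [name] := by
        rw [pvPopGz]; simp
      rw [get_file_basename_and_extension, get_file_basename_and_extension_alt]
      simp [hneg, hparts, hpop, PySem.List.pyGet?, PySem.List.pyIdx?]
    · -- a dot at i: parts = (parts of name[:i]) ++ [name[i+1:]]
      have hdot : PySem.Str.rfind name "." = (i : Int) := by rw [hrfind, hri]
      have hne : ¬ ((i : Int)) = -1 := by omega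
      have hcast : (i : Int) + 1 = ((i + 1 : Nat) : Int) := by push_cast; ring
      have hext : (PySem.Str.slice name (some ((i : Int) + 1)) none).toList
          = name.toList.drop (i+1) := by rw [hcast]; exact pvSliceDrop name (i+1)
      have hbase : (PySem.Str.slice name (some 0) (some ((i : Int)))).toList
          = name.toList.take i := pvSliceTake name i
      have hbase' : PySem.Str.slice name (some 0) (some ((i : Int)))
          = String.ofList (name.toList.take i) := pvStrEqOfToList hbase
      have hext' : PySem.Str.slice name (some ((i : Int) + 1)) none
          = String.ofList (name.toList.drop (i+1)) := pvStrEqOfToList hext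
      have hparts : (PySem.Str.split? name ".").getD []
          = (pvSp (name.toList.take i)).map String.ofList
              ++ [String.ofList (name.toList.drop (i+1))] := by
        rw [pvSplitParts]
        conv_lhs => rw [hdecomp]
        rw [pvSp_append _ _ hnd]
        simp
      by_cases hgz : name.toList.drop (i+1) = ['g', 'z']
      · -- gzip branch: A recurses on the prefix before the last dot; B pops the last component
        have hofgz : String.ofList (name.toList.drop (i+1)) = "gz" := by
          rw [hgz, pvOfListGz]
        have hextgz : PySem.Str.slice name (some ((i : Int) + 1)) none = "gz" :=
          hext'.trans hofgz
        have hA : get_file_basename_and_extension name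
            = get_file_basename_and_extension
                (PySem.Str.slice name (some 0) (some ((i : Int)))) := by
          rw [get_file_basename_and_extension]
          simp [hri, hne, hextgz]
        have hcond : 1 < ((pvSp (name.toList.take i)).map String.ofList
              ++ [String.ofList (name.toList.drop (i+1))]).length ∧
            PySem.List.pyGet? ((pvSp (name.toList.take i)).map String.ofList
              ++ [String.ofList (name.toList.drop (i+1))]) (-1) = some "gz" := by
          constructor
          · have := pvSp_length_pos (name.toList.take i)
            simp only [List.length_append, List.length_map, List.length_cons, List.length_nil]
            omega
          · rw [pvPyGetLast, hofgz]
        have hpop1 : pvPopGz ((PySem.Str.split? name ".").getD [])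
            = pvPopGz ((pvSp (name.toList.take i)).map String.ofList) := by
          rw [hparts, pvPopGz, dif_pos hcond, List.dropLast_concat]
        have hBparts : (PySem.Str.split?
              (PySem.Str.slice name (some 0) (some ((i : Int)))) ".").getD []
            = (pvSp (name.toList.take i)).map String.ofList := by
          rw [pvSplitParts, hbase]
        have hB : get_file_basename_and_extension_alt name
            = get_file_basename_and_extension_alt
                (PySem.Str.slice name (some 0) (some ((i : Int)))) := by
          rw [get_file_basename_and_extension_alt, get_file_basename_and_extension_alt,
            hBparts, hpop1]
        rw [hA, hB]
        have hdotne : ¬ PySem.Str.rfind name "." = -1 := by rw [hdot]; exact hne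
        have hlt := pvRfind_slice_len_lt name hdotne
        rw [hdot] at hlt
        exact ih _ (by omega) _ rfl
      · -- non-gzip branch: A splits at the last dot; B's loop idles and rejoins all but the last part
        have hofne : ¬ String.ofList (name.toList.drop (i+1)) = "gz" := by
          intro hc
          apply hgz
          have hcl := congrArg String.toList hc
          rw [String.toList_ofList, pvToListGz] at hcl
          exact hcl
        have hextne : ¬ PySem.Str.slice name (some ((i : Int) + 1)) none = "gz" := by
          rw [hext']; exact hofne
        have hA : get_file_basename_and_extension name
            = (PySem.Str.slice name (some 0) (some ((i : Int))),
               PySem.Str.slice name (some ((i : Int) + 1)) none) := by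
          rw [get_file_basename_and_extension]
          simp [hri, hne, hextne]
        have hcondn : ¬ (1 < ((pvSp (name.toList.take i)).map String.ofList
              ++ [String.ofList (name.toList.drop (i+1))]).length ∧
            PySem.List.pyGet? ((pvSp (name.toList.take i)).map String.ofList
              ++ [String.ofList (name.toList.drop (i+1))]) (-1) = some "gz") := by
          rintro ⟨-, hlgz⟩
          rw [pvPyGetLast, Option.some_inj] at hlgz
          exact hofne hlgz
        have hpop : pvPopGz ((PySem.Str.split? name ".").getD [])
            = (pvSp (name.toList.take i)).map String.ofList
              ++ [String.ofList (name.toList.drop (i+1))] := by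
          rw [hparts, pvPopGz, dif_neg hcondn]
        have hlenne : ¬ (((pvSp (name.toList.take i)).map String.ofList
              ++ [String.ofList (name.toList.drop (i+1))]).length == 1) = true := by
          have := pvSp_length_pos (name.toList.take i)
          simp only [List.length_append, List.length_map, List.length_cons,
            List.length_nil, beq_iff_eq]
          omega
        have hjoin : PySem.Str.join "." ((pvSp (name.toList.take i)).map String.ofList)
            = String.ofList (name.toList.take i) := by
          rw [PySem.Str.join]
          have hmm : ((pvSp (name.toList.take i)).map String.ofList).map String.toList
              = pvSp (name.toList.take i) := by
            rw [List.map_map]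
            simp [Function.comp_def, String.toList_ofList]
          have hsep : ".".toList = ['.'] := by decide
          rw [hmm, hsep, pvJoin_sp]
        have hlast : (PySem.List.pyGet? ((pvSp (name.toList.take i)).map String.ofList
              ++ [String.ofList (name.toList.drop (i+1))]) (-1)).getD ""
            = String.ofList (name.toList.drop (i+1)) := by
          rw [pvPyGetLast]
          rfl
        rw [hA]
        simp only [get_file_basename_and_extension_alt]
        rw [hpop, if_neg hlenne, List.dropLast_concat, hjoin, hlast, hbase', hext']

-- ===== VERDICT (by name: the statement is the Claim_ definition above) =====
theorem get_file_basename_and_extension_spec : Claim_equal_get_file_basename_and_extension := by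
  intro name _
  unfold Spec_get_file_basename_and_extension
  exact pvMain name.length name rfl
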